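-- pv_equiv track=rewrite | github.com/b-reyn/form-bridge | docs/examples/security/security-monitoring-implementation.py | determine_event_severity
-- ===== SOURCE A (Python) =====
-- def determine_event_severity(event, alerts):
--     """Determine overall severity based on event and generated alerts"""
--     if any(alert.get('severity') == 'CRITICAL' for alert in alerts):
--         return 'CRITICAL'
--     elif any(alert.get('severity') == 'HIGH' for alert in alerts):
--         return 'HIGH'
--     elif any(alert.get('severity') == 'MEDIUM' for alert in alerts):
--         return 'MEDIUM'
--     else:
--         return 'LOW'
-- ===== SOURCE B (Python) =====
-- _RANK = {'CRITICAL': 3, 'HIGH': 2, 'MEDIUM': 1}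
-- _NAMES = ('LOW', 'MEDIUM', 'HIGH', 'CRITICAL')
--
-- def determine_event_severity(event, alerts):
--     """Determine overall severity based on event and generated alerts"""
--     best = 0
--     for alert in alerts:
--         best = max(best, _RANK.get(alert.get('severity'), 0))
--     return _NAMES[best]
-- ===== Notes on version B (the rewrite author's own statement) =====
-- stated objective: alternative
-- what changed: Replaces the three ordered per-level any-scans with a single fold over the alerts maintaining the maximum numeric severity rank (CRITICAL=3, HIGH=2, MEDIUM=1, other=0), then maps the maximum rank back to its name via an indexed table.
import Mathlib
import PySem

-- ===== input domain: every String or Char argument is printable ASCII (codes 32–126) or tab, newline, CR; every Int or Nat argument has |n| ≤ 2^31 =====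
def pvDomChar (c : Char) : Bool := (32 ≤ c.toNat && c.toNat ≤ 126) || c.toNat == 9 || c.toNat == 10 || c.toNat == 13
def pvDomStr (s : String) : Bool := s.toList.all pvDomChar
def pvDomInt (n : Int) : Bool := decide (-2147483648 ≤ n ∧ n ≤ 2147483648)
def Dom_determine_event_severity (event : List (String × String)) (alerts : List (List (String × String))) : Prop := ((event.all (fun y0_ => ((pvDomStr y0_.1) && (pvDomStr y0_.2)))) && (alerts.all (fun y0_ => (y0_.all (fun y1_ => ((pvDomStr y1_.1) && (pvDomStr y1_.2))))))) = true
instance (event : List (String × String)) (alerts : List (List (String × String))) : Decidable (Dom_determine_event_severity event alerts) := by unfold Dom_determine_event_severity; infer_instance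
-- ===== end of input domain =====

-- B replaces A's three ordered per-level any-scans with a single fold keeping the
-- maximum numeric severity rank, mapped back through a rank→name table (objective: alternative).

-- ===== PORT A =====
def determine_event_severity (event : List (String × String)) (alerts : List (List (String × String))) : String :=
  if alerts.any (fun alert => PySem.Dict.get? (PySem.Dict.mk alert) "severity" == some "CRITICAL") then "CRITICAL"
  else if alerts.any (fun alert => PySem.Dict.get? (PySem.Dict.mk alert) "severity" == some "HIGH") then "HIGH"
  else if alerts.any (fun alert => PySem.Dict.get? (PySem.Dict.mk alert) "severity" == some "MEDIUM") then "MEDIUM"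
  else "LOW"

-- ===== PORT B =====
-- module-level RANK dict of Source B
def pvRankDict : PySem.Dict String Nat := PySem.Dict.mk [("CRITICAL", 3), ("HIGH", 2), ("MEDIUM", 1)]
-- _RANK.get(alert.get('severity'), 0): a None key never matches a str-keyed dict, so it yields the default 0 (exact)
def pvRankOf (alert : List (String × String)) : Nat :=
  match PySem.Dict.get? (PySem.Dict.mk alert) "severity" with
  | some s => PySem.Dict.getD pvRankDict s 0
  | none => 0
def determine_event_severity_alt (event : List (String × String)) (alerts : List (List (String × String))) : String :=
  let best := alerts.foldl (fun b alert => max b (pvRankOf alert)) 0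
  -- _NAMES[best]: best is provably ≤ 3, so the tuple index is always in range (exact)
  ["LOW", "MEDIUM", "HIGH", "CRITICAL"].getD best "LOW"

-- ===== PRECONDITION & SPEC =====
def Spec_determine_event_severity (event : List (String × String)) (alerts : List (List (String × String))) (out : String) : Prop := out = determine_event_severity_alt event alerts
instance (event : List (String × String)) (alerts : List (List (String × String))) (out : String) : Decidable (Spec_determine_event_severity event alerts out) := by unfold Spec_determine_event_severity; infer_instance

-- ===== CLAIM (what is proved, stated in full; the proofs are below) =====
def Claim_equal_determine_event_severity : Prop := ∀ (event : List (String × String)) (alerts : List (List (String × String))), Dom_determine_event_severity event alerts → Spec_determine_event_severity event alerts (determine_event_severity event alerts)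

-- ===== LEMMAS AND PROOFS =====

-- the nested-if characterisation of the maximum rank fold, as a function of A's three any-scans
def pvSev (alerts : List (List (String × String))) : Nat :=
  if alerts.any (fun alert => PySem.Dict.get? (PySem.Dict.mk alert) "severity" == some "CRITICAL") then 3
  else if alerts.any (fun alert => PySem.Dict.get? (PySem.Dict.mk alert) "severity" == some "HIGH") then 2
  else if alerts.any (fun alert => PySem.Dict.get? (PySem.Dict.mk alert) "severity" == some "MEDIUM") then 1
  else 0

theorem pv_rank_head (a : List (String × String)) :
    pvRankOf a =
      if PySem.Dict.get? (PySem.Dict.mk a) "severity" == some "CRITICAL" then 3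
      else if PySem.Dict.get? (PySem.Dict.mk a) "severity" == some "HIGH" then 2
      else if PySem.Dict.get? (PySem.Dict.mk a) "severity" == some "MEDIUM" then 1
      else 0 := by
  unfold pvRankOf
  rcases h : PySem.Dict.get? (PySem.Dict.mk a) "severity" with _ | s
  · simp
  · by_cases h1 : s = "CRITICAL"
    · subst h1; simp [pvRankDict, PySem.Dict.getD, PySem.Dict.get?]
    · by_cases h2 : s = "HIGH"
      · subst h2; simp [pvRankDict, PySem.Dict.getD, PySem.Dict.get?]
      · by_cases h3 : s = "MEDIUM"
        · subst h3; simp [pvRankDict, PySem.Dict.getD, PySem.Dict.get?]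
        · have e1 : ("CRITICAL" == s) = false := beq_eq_false_iff_ne.mpr (fun e => h1 e.symm)
          have e2 : ("HIGH" == s) = false := beq_eq_false_iff_ne.mpr (fun e => h2 e.symm)
          have e3 : ("MEDIUM" == s) = false := beq_eq_false_iff_ne.mpr (fun e => h3 e.symm)
          have f1 : (s == "CRITICAL") = false := beq_eq_false_iff_ne.mpr h1
          have f2 : (s == "HIGH") = false := beq_eq_false_iff_ne.mpr h2
          have f3 : (s == "MEDIUM") = false := beq_eq_false_iff_ne.mpr h3
          simp [pvRankDict, PySem.Dict.getD, PySem.Dict.get?, List.find?, e1, e2, e3, f1, f2, f3]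

theorem pv_sev_cons (a : List (String × String)) (l : List (List (String × String))) :
    pvSev (a :: l) = max (pvRankOf a) (pvSev l) := by
  rw [pv_rank_head]
  cases hA1 : (PySem.Dict.get? (PySem.Dict.mk a) "severity" == some "CRITICAL") <;>
  cases hA2 : (PySem.Dict.get? (PySem.Dict.mk a) "severity" == some "HIGH") <;>
  cases hA3 : (PySem.Dict.get? (PySem.Dict.mk a) "severity" == some "MEDIUM") <;>
  cases hC1 : l.any (fun alert => PySem.Dict.get? (PySem.Dict.mk alert) "severity" == some "CRITICAL") <;>
  cases hC2 : l.any (fun alert => PySem.Dict.get? (PySem.Dict.mk alert) "severity" == some "HIGH") <;>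
  cases hC3 : l.any (fun alert => PySem.Dict.get? (PySem.Dict.mk alert) "severity" == some "MEDIUM") <;>
  simp [pvSev, List.any_cons, hA1, hA2, hA3, hC1, hC2, hC3]

theorem pv_fold_eq_sev (alerts : List (List (String × String))) (b : Nat) :
    alerts.foldl (fun b alert => max b (pvRankOf alert)) b = max b (pvSev alerts) := by
  induction alerts generalizing b with
  | nil => simp [pvSev]
  | cons a l ih =>
      simp only [List.foldl_cons, ih, pv_sev_cons]
      omega

-- ===== VERDICT (by name: the statement is the Claim_ definition above) =====
theorem determine_event_severity_spec : Claim_equal_determine_event_severity := by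
  intro event alerts _
  unfold Spec_determine_event_severity determine_event_severity determine_event_severity_alt
  rw [pv_fold_eq_sev]
  unfold pvSev
  by_cases h1 : alerts.any (fun alert => PySem.Dict.get? (PySem.Dict.mk alert) "severity" == some "CRITICAL") = true <;>
  by_cases h2 : alerts.any (fun alert => PySem.Dict.get? (PySem.Dict.mk alert) "severity" == some "HIGH") = true <;>
  by_cases h3 : alerts.any (fun alert => PySem.Dict.get? (PySem.Dict.mk alert) "severity" == some "MEDIUM") = true <;>
  simp [h1, h2, h3]
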